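-- pv_equiv track=rewrite | github.com/NicoIer/Python-Explore | 八股&面试&笔试/腾讯/4.py | solution
-- ===== SOURCE A (Python) =====
-- def solution(n: int, k: int) -> int:
--     """
--     :param n:
--     :param k:
--     :return: 多少个长度为n 且 与S不同的二进制位串 可以产生和S相同的校验和 (mod (10**9+7))
--     """
--
--     # 1. 生成所有长度为n的二进制位串
--     # 2. 计算每个二进制位串的校验和
--     # 3. 计算与S不同的二进制位串的校验和
--     # 4. 返回结果
--
--     def cal(bin_str: str, k: int) -> int:
--         """
--         计算二进制位串的校验和
--         :param bin_str: 二进制位串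
--         :param k: 校验和的长度
--         :return: 校验和
--         """
--         ans = 0
--         for i in range(len(bin_str) - k + 1):
--             ans ^= int(bin_str[i:i + k], 2)
--         return ans
--
--     # 1.
--     all_bin_strs = []
--     for i in range(2 ** n):
--         all_bin_strs.append(bin(i)[2:].zfill(n))
--     # 2.
--     all_bin_strs_sum = []
--     for bin_str in all_bin_strs:
--         all_bin_strs_sum.append(cal(bin_str, k))
--     # 3.
--     S = all_bin_strs[0]
--     S_sum = all_bin_strs_sum[0]
--     diff_bin_strs_sum = []
--     for i in range(1, len(all_bin_strs)):
--         if all_bin_strs_sum[i] != S_sum: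
--             diff_bin_strs_sum.append(all_bin_strs_sum[i])
--     # 4.
--     return sum(diff_bin_strs_sum) % (10 ** 9 + 7)
-- ===== SOURCE B (Python) =====
-- def solution(n: int, k: int) -> int:
--     # Closed form: the discarded zero checksums contribute 0 to the sum, so the answer is the
--     # sum of checksums over all 2**n strings; bit b (b < k) of a checksum is the parity of the
--     # n-k+1 bit positions b..b+n-k, which is 1 for exactly half of all strings.  Hence the
--     # total is (2**k - 1) * 2**(n-1), computed with modular exponentiation.
--     MOD = 10 ** 9 + 7
--     if k < 1 or k > n:
--         return 0
--     return (pow(2, k, MOD) - 1) * pow(2, n - 1, MOD) % MOD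
-- ===== Notes on version B (the rewrite author's own statement) =====
-- stated objective: faster
-- what changed: B replaces the enumeration of all 2**n binary strings with string slicing and re-parsing by the closed form (2**k-1)*2**(n-1) mod 10**9+7 (each of the k checksum bits is the parity of a fixed nonempty set of string positions, hence 1 for exactly half of all strings, and the filtered-out zero checksums contribute nothing to the sum), computed with modular exponentiation.
import Mathlib
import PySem

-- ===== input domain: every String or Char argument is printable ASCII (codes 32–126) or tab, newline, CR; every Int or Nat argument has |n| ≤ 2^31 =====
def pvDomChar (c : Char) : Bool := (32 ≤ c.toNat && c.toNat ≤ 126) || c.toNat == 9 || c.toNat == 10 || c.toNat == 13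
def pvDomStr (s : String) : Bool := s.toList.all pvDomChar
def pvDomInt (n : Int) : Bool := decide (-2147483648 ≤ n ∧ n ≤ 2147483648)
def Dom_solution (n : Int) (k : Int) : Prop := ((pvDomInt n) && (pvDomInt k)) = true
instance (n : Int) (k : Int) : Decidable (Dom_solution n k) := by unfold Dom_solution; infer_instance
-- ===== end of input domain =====

-- B replaces A's enumeration of all 2^n binary strings by the closed form
-- (2^k-1)*2^(n-1) mod 10^9+7 computed with modular exponentiation (objective: faster).

-- ===== PORT A =====
-- int(s, 2), ported by hand step for step (the prelude's ofCharsBase? keeps its digit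
-- helpers private to itself): none exactly where Python raises ValueError on the strings A
-- parses — the empty slice (reached only when k < 1, excluded by Pre_solution); every
-- non-empty string A parses consists of '0'/'1' characters only, where this parse is exact.
def pvBit? (c : Char) : Option Nat :=
  if c = '0' then some 0 else if c = '1' then some 1 else none

def pvInt2? (cs : List Char) : Option Int :=
  if cs.isEmpty then none
  else (cs.foldl (fun a c => a.bind fun v => (pvBit? c).map fun d => 2 * v + d) (some 0)).map Int.ofNat

def pvZfill (s : List Char) (w : Int) : List Char :=
  if s.length < w.toNat then List.replicate (w.toNat - s.length) '0' ++ s else s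

def calA (k : Int) (s : List Char) : Int :=
  (PySem.List.pyRange 0 (PySem.List.len s - k + 1) 1).foldl
    (fun ans i =>
      PySem.Int.bxor ans ((pvInt2? (PySem.List.slice s (some i) (some (i + k)))).getD 0))
    0

def solution (n : Int) (k : Int) : Int :=
  if n < 0 then 0 else -- for n < 0, 2**n is a float and range() raises TypeError (outside Pre_solution)
  -- 1. all_bin_strs: bin(i)[2:].zfill(n) for i in range(2**n)
  let allBin := (PySem.List.pyRange 0 ((2 : Int) ^ n.toNat) 1).foldl
    (fun acc i => acc ++ [pvZfill (PySem.List.slice (PySem.Int.toBinChars0b i) (some 2) none) n]) []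
  -- 2. the checksum of each string
  let sums := allBin.foldl (fun acc s => acc ++ [calA k s]) []
  -- 3. keep the checksums that differ from S's (S = all_bin_strs[0])
  let S_sum := PySem.List.pyGetD sums 0 0
  let diff := (PySem.List.pyRange 1 (PySem.List.len allBin) 1).foldl
    (fun acc i => if PySem.List.pyGetD sums i 0 ≠ S_sum then acc ++ [PySem.List.pyGetD sums i 0] else acc) []
  -- 4.
  PySem.Int.mod diff.sum (10 ^ 9 + 7)

-- ===== PORT B =====
def solution_alt (n : Int) (k : Int) : Int :=
  let MOD : Int := 10 ^ 9 + 7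
  if k < 1 ∨ n < k then 0
  else PySem.Int.mod ((PySem.Int.powMod 2 k.toNat MOD - 1) * PySem.Int.powMod 2 (n - 1).toNat MOD) MOD

-- ===== PRECONDITION & SPEC =====
-- exactly the inputs on which the Python A returns: for n < 0 it raises TypeError (2**n is
-- a float passed to range), for k < 1 it raises ValueError (int('', 2) on the empty slice)
def Pre_solution (n : Int) (k : Int) : Prop := 0 ≤ n ∧ 1 ≤ k
instance (n : Int) (k : Int) : Decidable (Pre_solution n k) := by unfold Pre_solution; infer_instance

def pvWitness_solution : Int × Int := (4, 2)

def Spec_solution (n : Int) (k : Int) (out : Int) : Prop := out = solution_alt n k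
instance (n : Int) (k : Int) (out : Int) : Decidable (Spec_solution n k out) := by unfold Spec_solution; infer_instance

-- ===== CLAIM (what is proved, stated in full; the proofs are below) =====
def Claim_equal_solution : Prop := ∀ (n : Int) (k : Int), Dom_solution n k → Pre_solution n k → Spec_solution n k (solution n k)

-- ===== LEMMAS AND PROOFS =====

def bitsStr : Nat → Nat → List Char
  | 0, _ => []
  | L + 1, m => bitsStr L (m / 2) ++ [Nat.digitChar (m % 2)]

def chkN (W K m : Nat) : Nat :=
  (List.range (W + 1)).foldl (fun a j => a ^^^ ((m >>> (W - j)) % 2 ^ K)) 0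

theorem length_bitsStr (L m : Nat) : (bitsStr L m).length = L := by
  induction L generalizing m with
  | zero => rfl
  | succ L ih => simp [bitsStr, ih]

theorem mod_two_pow_succ (v K : Nat) : v % 2 ^ (K + 1) = 2 * ((v / 2) % 2 ^ K) + v % 2 := by
  rw [pow_succ, mul_comm (2 ^ K) 2, Nat.mod_mul]
  omega

theorem bitsStr_split (L j m : Nat) (h : j ≤ L) :
    bitsStr L m = bitsStr (L - j) (m / 2 ^ j) ++ bitsStr j m := by
  induction L generalizing j m with
  | zero => interval_cases j; simp [bitsStr]
  | succ L ih =>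
    cases j with
    | zero => simp [bitsStr]
    | succ j =>
      have hj : j ≤ L := by omega
      have hdd : m / 2 / 2 ^ j = m / 2 ^ (j + 1) := by
        rw [Nat.div_div_eq_div_mul, pow_succ, mul_comm]
      calc bitsStr (L + 1) m = bitsStr L (m / 2) ++ [Nat.digitChar (m % 2)] := rfl
        _ = (bitsStr (L - j) (m / 2 ^ (j + 1)) ++ bitsStr j (m / 2)) ++ [Nat.digitChar (m % 2)] := by
              rw [ih j (m / 2) hj, hdd]
        _ = bitsStr (L - j) (m / 2 ^ (j + 1)) ++ (bitsStr j (m / 2) ++ [Nat.digitChar (m % 2)]) := by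
              rw [List.append_assoc]
        _ = bitsStr (L + 1 - (j + 1)) (m / 2 ^ (j + 1)) ++ bitsStr (j + 1) m := by
              rw [Nat.succ_sub_succ]; rfl

theorem bitsStr_zero (L : Nat) : bitsStr L 0 = List.replicate L '0' := by
  induction L with
  | zero => rfl
  | succ L ih => rw [List.replicate_succ']; simp [bitsStr, ih]; rfl

theorem toDigits_eq_bitsStr (m : Nat) : Nat.toDigits 2 m = bitsStr (Nat.toDigits 2 m).length m := by
  induction m using Nat.strong_induction_on with
  | _ m ih =>
    by_cases h : m < 2
    · rw [Nat.toDigits_of_lt_base h]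
      show _ = bitsStr 1 m
      show _ = bitsStr 0 (m / 2) ++ [Nat.digitChar (m % 2)]
      rw [Nat.mod_eq_of_lt h]; rfl
    · rw [Nat.toDigits_of_base_le (by norm_num) (by omega)]
      rw [List.length_append, List.length_singleton]
      show _ = bitsStr ((Nat.toDigits 2 (m / 2)).length) (m / 2) ++ [Nat.digitChar (m % 2)]
      rw [← ih (m / 2) (by omega)]

theorem gen_eq_bitsStr (N m : Nat) (hN : 1 ≤ N) (hm : m < 2 ^ N) :
    pvZfill (PySem.List.slice (PySem.Int.toBinChars0b (m : Int)) (some 2) none) (N : Int) = bitsStr N m := by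
  have h0b : PySem.Int.toBinChars0b (m : Int) = '0' :: 'b' :: Nat.toDigits 2 m := by
    simp [PySem.Int.toBinChars0b]
  rw [h0b, PySem.List.slice_from _ (by norm_num)]
  show pvZfill (Nat.toDigits 2 m) (N : Int) = bitsStr N m
  have hd : Nat.toDigits 2 m = bitsStr (Nat.toDigits 2 m).length m := toDigits_eq_bitsStr m
  set d := (Nat.toDigits 2 m).length with hdef
  have hdN : d ≤ N := (Nat.length_toDigits_le_iff (by norm_num) (by omega)).mpr hm
  have hd0 : 0 < d := Nat.length_toDigits_pos
  have hmd : m < 2 ^ d := (Nat.length_toDigits_le_iff (by norm_num) hd0).mp le_rfl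
  have key : bitsStr N m = List.replicate (N - d) '0' ++ bitsStr d m := by
    rw [bitsStr_split N d m hdN, Nat.div_eq_of_lt hmd, bitsStr_zero]
  unfold pvZfill
  rw [hd]
  simp only [length_bitsStr, Int.toNat_natCast]
  by_cases hlt : d < N
  · rw [if_pos hlt, key, ← hd]
  · rw [if_neg hlt, key, ← hd]
    have : N - d = 0 := by omega
    rw [this]
    rfl

theorem parse_bitsStr_fold (K v a : Nat) :
    (bitsStr K v).foldl (fun a c => a.bind fun x => (pvBit? c).map fun d => 2 * x + d) (some a)
      = some (a * 2 ^ K + v % 2 ^ K) := by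
  induction K generalizing v a with
  | zero => simp [bitsStr, Nat.mod_one]
  | succ K ih =>
    show (bitsStr K (v / 2) ++ [Nat.digitChar (v % 2)]).foldl _ _ = _
    rw [List.foldl_append, ih]
    rcases Nat.mod_two_eq_zero_or_one v with h | h
    · rw [h]
      simp only [List.foldl_cons, List.foldl_nil, Option.bind_some]
      rw [show pvBit? (Nat.digitChar 0) = some 0 from rfl]
      simp only [Option.map_some]
      rw [mod_two_pow_succ v K, h]
      ring_nf
    · rw [h]
      simp only [List.foldl_cons, List.foldl_nil, Option.bind_some]
      rw [show pvBit? (Nat.digitChar 1) = some 1 from rfl]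
      simp only [Option.map_some]
      rw [mod_two_pow_succ v K, h]
      ring_nf

theorem parse_bitsStr (K v : Nat) (hK : 1 ≤ K) :
    pvInt2? (bitsStr K v) = some ((v % 2 ^ K : Nat) : Int) := by
  have hne : (bitsStr K v).isEmpty = false := by
    rw [List.isEmpty_eq_false_iff, ← List.length_pos_iff, length_bitsStr]; omega
  unfold pvInt2?
  rw [hne, if_neg (by simp), parse_bitsStr_fold K v 0]
  simp

theorem foldl_bxor_cast (g : Nat → Nat) (h : Nat → Int) (l : List Nat)
    (hp : ∀ j ∈ l, h j = ((g j : Nat) : Int)) (a : Nat) :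
    l.foldl (fun ans j => PySem.Int.bxor ans (h j)) (a : Int)
      = ((l.foldl (fun ans j => ans ^^^ g j) a : Nat) : Int) := by
  induction l generalizing a with
  | nil => rfl
  | cons x xs ih =>
    simp only [List.foldl_cons]
    rw [hp x (by simp), PySem.Int.bxor_natCast, ih (fun j hj => hp j (by simp [hj]))]

theorem cal_eq_chkN (N K m : Nat) (hK : 1 ≤ K) (hKN : K ≤ N) :
    calA (K : Int) (bitsStr N m) = ((chkN (N - K) K m : Nat) : Int) := by
  unfold calA
  rw [PySem.List.len_eq, length_bitsStr]
  have hb : ((N : Int) - (K : Int) + 1) = (((N - K + 1 : Nat) : Int)) := by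
    push_cast [Nat.cast_sub hKN]; ring
  rw [hb, PySem.List.pyRange_zero_nat (N - K + 1), List.foldl_map]
  rw [show (0 : Int) = ((0 : Nat) : Int) from rfl]
  rw [foldl_bxor_cast (fun j => (m >>> (N - K - j)) % 2 ^ K) _ _ ?_ 0]
  · rfl
  · intro j hj
    rw [List.mem_range] at hj
    have hjW : j ≤ N - K := by omega
    rw [PySem.List.slice_natCast_add]
    have hsplit1 : bitsStr N m = bitsStr j (m / 2 ^ (N - j)) ++ bitsStr (N - j) m := by
      have h := bitsStr_split N (N - j) m (by omega)
      rw [show N - (N - j) = j by omega] at h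
      exact h
    rw [hsplit1, List.drop_left' (by rw [length_bitsStr])]
    have hsplit2 : bitsStr (N - j) m = bitsStr K (m / 2 ^ (N - j - K)) ++ bitsStr (N - j - K) m := by
      have h := bitsStr_split (N - j) (N - j - K) m (by omega)
      rw [show (N - j) - (N - j - K) = K by omega] at h
      exact h
    rw [hsplit2, List.take_left' (by rw [length_bitsStr])]
    rw [parse_bitsStr K _ hK]
    simp only [Option.getD_some]
    rw [Nat.shiftRight_eq_div_pow, show N - K - j = N - j - K by omega]

def ind (b : Bool) : ZMod 2 := if b then 1 else 0

def par (W b m : Nat) : ZMod 2 := ∑ i ∈ Finset.range (W + 1), ind (m.testBit (b + i))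

theorem ind_xor : ∀ (x y : Bool), ind (x ^^ y) = ind x + ind y := by decide

theorem chkN_zero (W K : Nat) : chkN W K 0 = 0 := by
  unfold chkN
  exact List.foldl_fixed' (fun j => by simp) _

theorem chkN_lt (W K m : Nat) : chkN W K m < 2 ^ K := by
  unfold chkN
  have h : ∀ (l : List Nat) (a : Nat), a < 2 ^ K →
      l.foldl (fun a j => a ^^^ ((m >>> (W - j)) % 2 ^ K)) a < 2 ^ K := by
    intro l
    induction l with
    | nil => intro a ha; exact ha
    | cons x xs ih =>
      intro a ha
      exact ih _ (Nat.xor_lt_two_pow ha (Nat.mod_lt _ (by positivity)))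
  exact h _ 0 (by positivity)

-- list version to keep duplicates: use List.sum over map

theorem foldl_xor_testBit' (g : Nat → Nat) (b : Nat) (l : List Nat) (a : Nat) :
    ind ((l.foldl (fun x j => x ^^^ g j) a).testBit b)
      = ind (a.testBit b) + (l.map (fun j => ind ((g j).testBit b))).sum := by
  induction l generalizing a with
  | nil => simp
  | cons x xs ih =>
    simp only [List.foldl_cons, List.map_cons, List.sum_cons]
    rw [ih, Nat.testBit_xor, ind_xor]
    ring

theorem testBit_chkN (W K m b : Nat) (hb : b < K) :
    ind ((chkN W K m).testBit b) = par W b m := by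
  unfold chkN
  rw [foldl_xor_testBit' (fun j => (m >>> (W - j)) % 2 ^ K) b _ 0]
  have hterm : ∀ j, ind (((m >>> (W - j)) % 2 ^ K).testBit b) = ind (m.testBit ((W - j) + b)) := by
    intro j
    rw [Nat.testBit_mod_two_pow, Nat.testBit_shiftRight]
    simp [hb]
  simp only [hterm]
  have hls : ((List.range (W + 1)).map (fun j => ind (m.testBit ((W - j) + b)))).sum
      = ∑ j ∈ Finset.range (W + 1), ind (m.testBit ((W - j) + b)) := rfl
  rw [hls]
  have hrefl := Finset.sum_range_reflect (fun j => ind (m.testBit (j + b))) (W + 1)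
  simp only [Nat.add_sub_cancel] at hrefl
  rw [hrefl]
  simp [par, ind, Nat.zero_testBit, Nat.add_comm]

theorem par_flip (W b m : Nat) : par W b (m ^^^ 2 ^ b) = par W b m + 1 := by
  unfold par
  have hterm : ∀ i, ind ((m ^^^ 2 ^ b).testBit (b + i))
      = ind (m.testBit (b + i)) + (if i = 0 then 1 else 0) := by
    intro i
    rw [Nat.testBit_xor, ind_xor, Nat.testBit_two_pow]
    congr 1
    rcases Nat.eq_zero_or_pos i with h | h
    · simp [h, ind]
    · have : b ≠ b + i := by omega
      simp [ind, if_neg (by omega : ¬ i = 0)]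
  simp only [hterm]
  rw [Finset.sum_add_distrib, Finset.sum_ite_eq' (Finset.range (W + 1)) 0 (fun _ => (1 : ZMod 2))]
  simp

theorem card_par_one (N W b : Nat) (hb : b < N) :
    ((Finset.range (2 ^ N)).filter (fun m => par W b m = 1)).card = 2 ^ (N - 1) := by
  have hNpos : 1 ≤ N := by omega
  have hpow : (2 : Nat) ^ b < 2 ^ N := Nat.pow_lt_pow_right (by omega) hb
  have hmem : ∀ m ∈ Finset.range (2 ^ N), m ^^^ 2 ^ b ∈ Finset.range (2 ^ N) := by
    intro m hm
    rw [Finset.mem_range] at *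
    exact Nat.xor_lt_two_pow hm hpow
  have hflip : ∀ m, par W b (m ^^^ 2 ^ b) = 1 ↔ ¬ (par W b m = 1) := by
    intro m
    rw [par_flip]
    generalize par W b m = x
    revert x; decide
  have hflip' : ∀ m, par W b m = 1 → ¬ (par W b (m ^^^ 2 ^ b) = 1) :=
    fun m hm hc => ((hflip m).mp hc) hm
  have hcard : ((Finset.range (2 ^ N)).filter (fun m => par W b m = 1)).card
      = ((Finset.range (2 ^ N)).filter (fun m => ¬ (par W b m = 1))).card := by
    apply Finset.card_bij' (fun m _ => m ^^^ 2 ^ b) (fun m _ => m ^^^ 2 ^ b) ?hi ?hj ?li ?ri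
    case hi =>
      intro m hm
      rw [Finset.mem_filter] at hm ⊢
      exact ⟨hmem m hm.1, hflip' m hm.2⟩
    case hj =>
      intro m hm
      rw [Finset.mem_filter] at hm ⊢
      exact ⟨hmem m hm.1, (hflip m).mpr hm.2⟩
    case li => intro m _; exact Nat.xor_xor_cancel_right m (2 ^ b)
    case ri => intro m _; exact Nat.xor_xor_cancel_right m (2 ^ b)
  have htot := Finset.filter_card_add_filter_neg_card_eq_card
    (s := Finset.range (2 ^ N)) (fun m => par W b m = 1)
  rw [Finset.card_range] at htot
  have h2 : (2 : Nat) ^ N = 2 * 2 ^ (N - 1) := by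
    rw [← pow_succ']
    congr 1
    omega
  omega

theorem eq_sum_testBit (K x : Nat) (hx : x < 2 ^ K) :
    x = ∑ b ∈ Finset.range K, 2 ^ b * (x.testBit b).toNat := by
  induction K generalizing x with
  | zero => simp at hx; simp [hx]
  | succ K ih =>
    rw [Finset.sum_range_succ']
    have hdiv : x / 2 < 2 ^ K := by
      rw [Nat.div_lt_iff_lt_mul (by omega), ← pow_succ]
      exact hx
    have hbits : ∀ b, x.testBit (b + 1) = (x / 2).testBit b := by
      intro b
      rw [Nat.testBit_succ]
    simp only [hbits, pow_succ, pow_zero, one_mul]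
    have : ∑ b ∈ Finset.range K, 2 ^ b * 2 * ((x / 2).testBit b).toNat
        = 2 * ∑ b ∈ Finset.range K, 2 ^ b * ((x / 2).testBit b).toNat := by
      rw [Finset.mul_sum]
      apply Finset.sum_congr rfl
      intro b _
      ring
    rw [this, ← ih (x / 2) hdiv, Nat.testBit_zero]
    rcases Nat.mod_two_eq_zero_or_one x with h | h <;> rw [h] <;> simp <;> omega

theorem sum_two_pow (K : Nat) : ∑ b ∈ Finset.range K, 2 ^ b = 2 ^ K - 1 := by
  induction K with
  | zero => rfl
  | succ K ihK =>
    have h1 : (1 : Nat) ≤ 2 ^ K := Nat.one_le_two_pow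
    rw [Finset.sum_range_succ, ihK, pow_succ]
    omega

theorem sum_chkN (N K : Nat) (h1 : 1 ≤ K) (h2 : K ≤ N) :
    ∑ m ∈ Finset.range (2 ^ N), chkN (N - K) K m = (2 ^ K - 1) * 2 ^ (N - 1) := by
  have hdecomp : ∀ m, chkN (N - K) K m = ∑ b ∈ Finset.range K, 2 ^ b * ((chkN (N - K) K m).testBit b).toNat :=
    fun m => eq_sum_testBit K _ (chkN_lt _ _ _)
  calc ∑ m ∈ Finset.range (2 ^ N), chkN (N - K) K m
      = ∑ m ∈ Finset.range (2 ^ N), ∑ b ∈ Finset.range K, 2 ^ b * ((chkN (N - K) K m).testBit b).toNat := by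
        exact Finset.sum_congr rfl (fun m _ => hdecomp m)
    _ = ∑ b ∈ Finset.range K, ∑ m ∈ Finset.range (2 ^ N), 2 ^ b * ((chkN (N - K) K m).testBit b).toNat := by
        rw [Finset.sum_comm]
    _ = ∑ b ∈ Finset.range K, 2 ^ b * 2 ^ (N - 1) := by
        apply Finset.sum_congr rfl
        intro b hb
        rw [Finset.mem_range] at hb
        rw [← Finset.mul_sum]
        congr 1
        have hbit : ∀ m, ((chkN (N - K) K m).testBit b).toNat = if par (N - K) b m = 1 then 1 else 0 := by
          intro m
          have h := testBit_chkN (N - K) K m b hb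
          rcases hB : (chkN (N - K) K m).testBit b with _ | _
          · rw [hB] at h
            have : ¬ (par (N - K) b m = 1) := by rw [← h]; decide
            simp [this]
          · rw [hB] at h
            have : par (N - K) b m = 1 := by rw [← h]; decide
            simp [this]
        simp only [hbit]
        rw [Finset.sum_boole, card_par_one N (N - K) b (by omega)]
        exact Nat.cast_id _
    _ = (∑ b ∈ Finset.range K, 2 ^ b) * 2 ^ (N - 1) := by rw [Finset.sum_mul]
    _ = (2 ^ K - 1) * 2 ^ (N - 1) := by rw [sum_two_pow]

theorem pyGetD_map_range (g : Nat → Int) (M i : Nat) (hi : i < M) :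
    PySem.List.pyGetD ((List.range M).map g) (i : Int) 0 = g i := by
  rw [PySem.List.pyGetD_natCast]
  simp [List.getD, List.getElem?_map, List.getElem?_range hi]

theorem foldl_append_ne_zero_sum (h : Nat → Int) (l : List Nat) (acc : List Int) :
    (l.foldl (fun acc t => if h t ≠ 0 then acc ++ [h t] else acc) acc).sum
      = acc.sum + (l.map h).sum := by
  induction l generalizing acc with
  | nil => simp
  | cons x xs ih =>
    simp only [List.foldl_cons, List.map_cons, List.sum_cons]
    by_cases hx : h x ≠ 0
    · rw [if_pos hx, ih]
      simp
      ring
    · rw [if_neg hx]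
      rw [not_ne_iff] at hx
      rw [ih, hx]
      ring

theorem mod_sub_one_mul (a b : Int) :
    ((a - 1) * b) % (10 ^ 9 + 7) = ((a % (10 ^ 9 + 7) - 1) * (b % (10 ^ 9 + 7))) % (10 ^ 9 + 7) := by
  conv_lhs => rw [Int.mul_emod, Int.sub_emod]
  conv_rhs => rw [Int.mul_emod, Int.sub_emod, Int.emod_emod_of_dvd _ dvd_rfl,
    Int.emod_emod_of_dvd _ dvd_rfl]

theorem solution_closed (n k : Int) (hn : 0 ≤ n) (hk : 1 ≤ k) :
    solution n k = if k ≤ n then PySem.Int.mod (((2 ^ k.toNat - 1) * 2 ^ (n.toNat - 1) : Nat) : Int) (10 ^ 9 + 7) else 0 := by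
  set N := n.toNat with hN
  set K := k.toNat with hK
  have hn' : n = (N : Int) := (Int.toNat_of_nonneg hn).symm
  have hk' : k = (K : Int) := (Int.toNat_of_nonneg (by omega)).symm
  have hK1 : 1 ≤ K := by omega
  unfold solution
  rw [if_neg (by omega)]
  dsimp only
  rcases Nat.eq_zero_or_pos N with hN0 | hNpos
  · -- n = 0 : the diff loop is empty, the result is 0 % p = 0; B also returns 0 (k > n)
    have hn0 : n = 0 := by omega
    subst hn0
    have hr : PySem.List.pyRange 0 ((2 : Int) ^ (0 : Int).toNat) 1 = [0] := by decide
    rw [hr]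
    simp only [List.foldl_cons, List.foldl_nil, List.nil_append]
    rw [show PySem.List.len [pvZfill (PySem.List.slice (PySem.Int.toBinChars0b 0) (some 2) none) 0] = 1 from rfl]
    rw [PySem.List.pyRange_one_eq_nil (by norm_num)]
    simp only [List.foldl_nil, List.sum_nil]
    rw [if_neg (by omega)]
    rw [PySem.Int.mod_eq_emod_of_pos (by norm_num)]
    rfl
  · -- n ≥ 1
    set M := 2 ^ N with hM
    have hMpos : 0 < M := by positivity
    -- step 1: all_bin_strs is the list of the N-bit strings of 0 .. 2^N-1
    rw [PySem.List.foldl_append_singleton_eq_map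
          (fun i => pvZfill (PySem.List.slice (PySem.Int.toBinChars0b i) (some 2) none) n),
        List.nil_append]
    rw [show ((2 : Int) ^ n.toNat) = ((M : Nat) : Int) by rw [hM]; push_cast; rfl]
    rw [PySem.List.pyRange_zero_nat M, List.map_map]
    rw [List.map_congr_left (g := fun m => bitsStr N m)
      (fun m hm => by
        show pvZfill (PySem.List.slice (PySem.Int.toBinChars0b ((m : Nat) : Int)) (some 2) none) n = bitsStr N m
        rw [hn']
        exact gen_eq_bitsStr N m hNpos (by rw [← hM]; exact List.mem_range.mp hm))]
    -- step 2: the checksum list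
    rw [PySem.List.foldl_append_singleton_eq_map (calA k), List.nil_append, List.map_map]
    rw [PySem.List.len_eq, List.length_map, List.length_range]
    by_cases hkn : k ≤ n
    · -- 1 ≤ k ≤ n : every checksum is chkN, the closed sum applies
      have hKN : K ≤ N := by omega
      have hcal : ∀ m, (calA k ∘ fun m => bitsStr N m) m = ((chkN (N - K) K m : Nat) : Int) := by
        intro m
        show calA k (bitsStr N m) = _
        rw [hk']
        exact cal_eq_chkN N K m hK1 hKN
      rw [List.map_congr_left (fun m _ => hcal m)]
      set g : Nat → Int := fun m => ((chkN (N - K) K m : Nat) : Int) with hg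
      have hS : PySem.List.pyGetD ((List.range M).map g) 0 0 = 0 := by
        rw [PySem.List.pyGetD_zero]
        have h0 : ((List.range M).map g)[0]? = some (g 0) := by
          rw [List.getElem?_map, List.getElem?_range hMpos]
          rfl
        rw [List.getD, h0]
        simp [hg, chkN_zero]
      rw [hS]
      -- the filtering loop over i = 1 .. M-1
      rw [PySem.List.pyRange_one 1 ((M : Nat) : Int)]
      rw [show (((M : Nat) : Int) - 1).toNat = M - 1 by omega]
      rw [List.foldl_map]
      have hbody : ∀ (acc : List Int), ∀ t ∈ List.range (M - 1),
          (if PySem.List.pyGetD ((List.range M).map g) (1 + (t : Int)) 0 ≠ 0 then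
            acc ++ [PySem.List.pyGetD ((List.range M).map g) (1 + (t : Int)) 0] else acc)
          = (if (fun t => g (1 + t)) t ≠ 0 then acc ++ [(fun t => g (1 + t)) t] else acc) := by
        intro acc t ht
        have ht' : 1 + t < M := by
          have := List.mem_range.mp ht; omega
        rw [show ((1 : Int) + (t : Int)) = (((1 + t : Nat)) : Int) by push_cast; ring]
        rw [pyGetD_map_range g M (1 + t) ht']
      rw [PySem.List.foldl_congr_mem _ _ _ _ hbody]
      rw [foldl_append_ne_zero_sum (fun t => g (1 + t)) (List.range (M - 1)) []]
      rw [List.sum_nil, zero_add]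
      -- add back the zero checksum of m = 0
      have hfull : ((List.range M).map g).sum = ((List.range (M - 1)).map (fun t => g (1 + t))).sum := by
        rw [show M = (M - 1) + 1 by omega, List.range_succ_eq_map]
        simp only [List.map_cons, List.sum_cons, List.map_map]
        rw [show g 0 = 0 by simp [hg, chkN_zero]]
        rw [zero_add]
        congr 1
        apply List.map_congr_left
        intro t _
        show g (t + 1) = g (1 + t)
        rw [Nat.add_comm]
      rw [← hfull]
      -- evaluate the full sum by the counting argument
      have hsum : ((List.range M).map g).sum = (((2 ^ K - 1) * 2 ^ (N - 1) : Nat) : Int) := by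
        rw [hg]
        rw [show (List.range M).map (fun m => ((chkN (N - K) K m : Nat) : Int))
              = ((List.range M).map (chkN (N - K) K)).map (fun x => ((x : Nat) : Int)) by rw [List.map_map]; rfl]
        rw [← Nat.cast_list_sum]
        rw [show ((List.range M).map (chkN (N - K) K)).sum = ∑ m ∈ Finset.range M, chkN (N - K) K m from rfl]
        rw [hM, sum_chkN N K hK1 hKN]
      rw [hsum, if_pos hkn]
    · -- k > n : there are no windows, every checksum is 0, the kept list is empty
      have hcal0 : ∀ m, (calA k ∘ fun m => bitsStr N m) m = 0 := by
        intro m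
        show calA k (bitsStr N m) = 0
        unfold calA
        rw [PySem.List.len_eq, length_bitsStr]
        rw [PySem.List.pyRange_one_eq_nil (by omega)]
        rfl
      rw [List.map_congr_left (fun m _ => hcal0 m)]
      have hS : PySem.List.pyGetD ((List.range M).map (fun _ => (0 : Int))) 0 0 = 0 := by
        rw [PySem.List.pyGetD_zero]
        have h0 : ((List.range M).map (fun _ => (0 : Int)))[0]? = some 0 := by
          rw [List.getElem?_map, List.getElem?_range hMpos]
          rfl
        rw [List.getD, h0]
        rfl
      rw [hS]
      rw [List.foldl_fixed' ?hfix]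
      case hfix =>
        intro i
        rw [if_neg ?hcond]
        case hcond =>
          intro hc
          apply hc
          simp only [PySem.List.pyGetD, PySem.List.pyGet?, PySem.List.pyIdx?, List.map_const']
          split_ifs <;> simp [List.getElem?_replicate] <;> split_ifs <;> rfl
      rw [List.sum_nil, if_neg hkn]
      rw [PySem.Int.mod_eq_emod_of_pos (by norm_num)]
      rfl

theorem alt_closed (n k : Int) (hn : 0 ≤ n) (hk : 1 ≤ k) :
    solution_alt n k = if k ≤ n then PySem.Int.mod (((2 ^ k.toNat - 1) * 2 ^ (n.toNat - 1) : Nat) : Int) (10 ^ 9 + 7) else 0 := by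
  unfold solution_alt
  dsimp only
  by_cases hkn : k ≤ n
  · rw [if_neg (by omega : ¬(k < 1 ∨ n < k)), if_pos hkn]
    have hp : (0 : Int) < 10 ^ 9 + 7 := by norm_num
    simp only [PySem.Int.powMod]
    rw [PySem.Int.mod_eq_emod_of_pos hp, PySem.Int.mod_eq_emod_of_pos hp,
        PySem.Int.mod_eq_emod_of_pos hp, PySem.Int.mod_eq_emod_of_pos hp]
    have h1 : (((2 ^ k.toNat - 1) * 2 ^ (n.toNat - 1) : Nat) : Int)
        = ((2 : Int) ^ k.toNat - 1) * 2 ^ (n.toNat - 1) := by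
      push_cast [Nat.cast_sub Nat.one_le_two_pow]
      ring
    have h2 : (n - 1).toNat = n.toNat - 1 := by omega
    rw [h1, h2]
    exact (mod_sub_one_mul (2 ^ k.toNat) (2 ^ (n.toNat - 1))).symm
  · rw [if_pos (by omega), if_neg hkn]

-- ===== VERDICT (by name: the statement is the Claim_ definition above) =====
theorem solution_spec : Claim_equal_solution := by
  intro n k _ hpre
  obtain ⟨hn, hk⟩ := hpre
  unfold Spec_solution
  exact (solution_closed n k hn hk).trans (alt_closed n k hn hk).symm
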